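-- pv_equiv track=rewrite | github.com/stellakaniaru/practice_solutions | candies2.py | createListMap
-- ===== SOURCE A (Python) =====
-- def createListMap(y):
--     '''creates a new list that has concatenated data spanning across multiple lines'''
--     #iterates through list with file contents and concatenates data spanning across multiple lines
--     data = " ".join(line.strip() for line in y if len(line)>=39)
--
--     newCntList = []
--     #loop through list with file content and append them to the new list.
--     for i in y:
--         #if the line does not span over multiple lines, add it as a single item to new list
--         if len(i) <39:
--             newCntList.append(i)
--         #add the content that has already been filtered in data
--         else:
--             newCntList.append(data)
--             break
--     return newCntList
-- ===== SOURCE B (Python) =====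
-- def createListMap(y):
--     '''creates a new list that has concatenated data spanning across multiple lines'''
--     # single fused pass with accumulators: short prefix, stripped long parts, seen flag
--     prefix = []
--     parts = []
--     seen_long = False
--     for line in y:
--         if len(line) >= 39:
--             seen_long = True
--             parts.append(line.strip())
--         elif not seen_long:
--             prefix.append(line)
--     if seen_long:
--         return prefix + [" ".join(parts)]
--     return prefix
-- ===== Notes on version B (the rewrite author's own statement) =====
-- stated objective: alternative
-- what changed: Replaces A's staged computation (a join over all long lines followed by a second append-until-break loop) with one fused pass maintaining three accumulators (short prefix, stripped long-line parts, seen flag), joining the parts only at the end.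
import Mathlib
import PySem

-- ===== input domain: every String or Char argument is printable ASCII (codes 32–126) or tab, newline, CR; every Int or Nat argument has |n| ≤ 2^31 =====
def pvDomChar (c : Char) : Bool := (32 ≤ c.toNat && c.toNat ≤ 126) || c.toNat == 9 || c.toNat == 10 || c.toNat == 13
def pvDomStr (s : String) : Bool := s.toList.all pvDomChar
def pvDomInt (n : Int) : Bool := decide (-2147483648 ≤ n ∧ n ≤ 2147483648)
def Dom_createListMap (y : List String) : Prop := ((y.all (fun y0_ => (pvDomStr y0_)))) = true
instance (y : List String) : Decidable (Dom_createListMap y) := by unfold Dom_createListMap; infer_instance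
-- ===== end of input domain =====

-- B fuses A's two stages (join over long lines, then append-until-break loop) into one pass
-- with three accumulators (short prefix, stripped parts, seen flag); objective: alternative, same cost.

-- len(line) >= 39
def pvLong (l : String) : Bool := decide (39 ≤ PySem.Str.len l)

-- ===== PORT A =====
-- " ".join(line.strip() for line in y if len(line)>=39)
def pvData (y : List String) : String :=
  PySem.Str.join " " ((y.filter pvLong).map PySem.Str.strip)

-- A's loop: append short lines; at the first long line append data and break
def pvLoopA (data : String) : List String → List String
  | [] => []
  | i :: rest =>
      if pvLong i = false then i :: pvLoopA data rest
      else [data]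

def createListMap (y : List String) : List String :=
  pvLoopA (pvData y) y

-- ===== PORT B =====
def pvStepB (st : List String × List String × Bool) (line : String) : List String × List String × Bool :=
  if pvLong line then (st.1, st.2.1 ++ [PySem.Str.strip line], true)
  else if st.2.2 = false then (st.1 ++ [line], st.2.1, st.2.2)
  else st

def createListMap_alt (y : List String) : List String :=
  let st := y.foldl pvStepB (([] : List String), ([] : List String), false)
  if st.2.2 then st.1 ++ [PySem.Str.join " " st.2.1] else st.1

-- ===== PRECONDITION & SPEC =====
def Spec_createListMap (y : List String) (out : List String) : Prop := out = createListMap_alt y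
instance (y : List String) (out : List String) : Decidable (Spec_createListMap y out) := by unfold Spec_createListMap; infer_instance

-- ===== CLAIM (what is proved, stated in full; the proofs are below) =====
def Claim_equal_createListMap : Prop := ∀ (y : List String), Dom_createListMap y → Spec_createListMap y (createListMap y)

-- ===== LEMMAS AND PROOFS =====
lemma pvFoldB_char (y : List String) (p q : List String) (b : Bool) :
    y.foldl pvStepB (p, q, b) =
      ((if b then p else p ++ y.takeWhile (fun l => !pvLong l)),
       q ++ (y.filter pvLong).map PySem.Str.strip,
       b || y.any pvLong) := by
  induction y generalizing p q b with
  | nil => simp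
  | cons i rest ih =>
      rw [List.foldl_cons]
      cases h : pvLong i with
      | true =>
          rw [show pvStepB (p, q, b) i = (p, q ++ [PySem.Str.strip i], true) by
            unfold pvStepB; rw [if_pos h]]
          rw [ih p (q ++ [PySem.Str.strip i]) true]
          rw [List.takeWhile_cons, List.filter_cons, List.any_cons, h]
          cases b <;> simp
      | false =>
          rw [List.takeWhile_cons, List.filter_cons, List.any_cons, h]
          cases b with
          | false =>
              rw [show pvStepB (p, q, false) i = (p ++ [i], q, false) by
                unfold pvStepB; rw [if_neg (by simp [h]), if_pos rfl]]
              rw [ih (p ++ [i]) q false]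
              simp
          | true =>
              rw [show pvStepB (p, q, true) i = (p, q, true) by
                unfold pvStepB; rw [if_neg (by simp [h]), if_neg (by simp)]]
              rw [ih p q true]
              simp

lemma pvLoopA_char (data : String) (y : List String) :
    pvLoopA data y =
      (if y.any pvLong then y.takeWhile (fun l => !pvLong l) ++ [data] else y) := by
  induction y with
  | nil => simp [pvLoopA]
  | cons i rest ih =>
      rw [List.takeWhile_cons, List.any_cons]
      cases h : pvLong i with
      | true =>
          rw [pvLoopA, if_neg (by simp [h])]
          simp
      | false =>
          rw [pvLoopA, if_pos h, ih]
          cases hr : rest.any pvLong <;> simp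

lemma pvTakeWhile_all (y : List String) (h : y.any pvLong = false) :
    y.takeWhile (fun l => !pvLong l) = y := by
  induction y with
  | nil => rfl
  | cons i rest ih =>
      rw [List.any_cons, Bool.or_eq_false_iff] at h
      rw [List.takeWhile_cons, if_pos (by simp [h.1]), ih h.2]

-- ===== VERDICT (by name: the statement is the Claim_ definition above) =====
theorem createListMap_spec : Claim_equal_createListMap := by
  intro y _
  show createListMap y = createListMap_alt y
  unfold createListMap createListMap_alt pvData
  rw [pvFoldB_char, pvLoopA_char]
  cases h : y.any pvLong with
  | true => rfl
  | false => rw [if_neg (by simp), if_neg (by simp), pvTakeWhile_all y h]; rfl
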